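-- pv_equiv track=rewrite | github.com/r-bex/docker-demos | single_container_demo/utils.py | condense_anomalous_periods
-- ===== SOURCE A (Python) =====
-- def condense_anomalous_periods(labelled_values):
--     anomalous_periods = []
--     currently_anom = False
--     anom_start = None
--
--     for (minute, value, anomalous) in labelled_values:
--         if not currently_anom and anomalous:
--             # start tracking a new anomalous zone
--             anom_start = minute
--             currently_anom = True
--         elif currently_anom and not anomalous:
--             # anomalous zone has ended
--             anomalous_periods.append((anom_start, minute))
--             currently_anom = False
--
--     return anomalous_periods
-- ===== SOURCE B (Python) =====
-- def condense_anomalous_periods(labelled_values):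
--     # phase 1: run-boundary list — (is_anomalous, start_minute) of each maximal run
--     runs = []
--     prev = None
--     for (minute, value, anomalous) in labelled_values:
--         flag = bool(anomalous)
--         if flag != prev:
--             runs.append((flag, minute))
--             prev = flag
--     # phase 2: each anomalous run with a successor run becomes a period
--     return [(a[1], b[1]) for a, b in zip(runs, runs[1:]) if a[0]]
-- ===== Notes on version B (the rewrite author's own statement) =====
-- stated objective: alternative
-- what changed: Two-phase decomposition: first collapse the stream into a run-boundary list of (is_anomalous, start_minute) pairs, then pair each anomalous run with its successor's start via zip, instead of A's single-pass state machine carrying currently_anom/anom_start.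
import Mathlib
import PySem

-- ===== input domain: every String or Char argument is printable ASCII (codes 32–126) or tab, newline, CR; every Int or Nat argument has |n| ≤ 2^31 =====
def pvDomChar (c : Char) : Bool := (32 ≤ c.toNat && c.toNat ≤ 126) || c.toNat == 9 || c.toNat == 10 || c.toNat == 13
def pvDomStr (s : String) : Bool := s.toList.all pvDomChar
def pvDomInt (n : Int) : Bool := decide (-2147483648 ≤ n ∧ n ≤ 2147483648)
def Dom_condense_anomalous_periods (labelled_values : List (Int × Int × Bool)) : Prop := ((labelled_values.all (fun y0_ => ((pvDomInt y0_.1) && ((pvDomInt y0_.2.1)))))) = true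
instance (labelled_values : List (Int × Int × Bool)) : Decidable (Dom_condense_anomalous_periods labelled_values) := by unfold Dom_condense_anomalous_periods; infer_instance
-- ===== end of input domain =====

-- B replaces A's single-pass state machine by a two-phase decomposition (run boundaries, then zip-pairing); objective: alternative.


-- ===== PORT A =====
-- A's for-loop with its three state variables (anomalous_periods, currently_anom, anom_start);
-- anom_start is Option Int (None initially); '.getD 0' is only evaluated when currently_anom,
-- where the invariant guarantees anom_start = some _ (as in the Python, which never appends None).
def pvA_loop (xs : List (Int × Int × Bool)) (acc : List (Int × Int)) (currently_anom : Bool)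
    (anom_start : Option Int) : List (Int × Int) :=
  match xs with
  | [] => acc
  | (minute, _value, anomalous) :: rest =>
    if ¬ currently_anom ∧ anomalous then
      pvA_loop rest acc true (some minute)
    else if currently_anom ∧ ¬ anomalous then
      pvA_loop rest (acc ++ [(anom_start.getD 0, minute)]) false anom_start
    else
      pvA_loop rest acc currently_anom anom_start

def condense_anomalous_periods (labelled_values : List (Int × Int × Bool)) : List (Int × Int) :=
  pvA_loop labelled_values [] false none

-- ===== PORT B =====
-- phase 1 of Source B: the run-boundary list (is_anomalous, start_minute); prev : Option Bool (None initially)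
def pvB_runs (xs : List (Int × Int × Bool)) (prev : Option Bool) : List (Bool × Int) :=
  match xs with
  | [] => []
  | (minute, _value, anomalous) :: rest =>
    if some anomalous ≠ prev then (anomalous, minute) :: pvB_runs rest (some anomalous)
    else pvB_runs rest prev

-- phase 2 of Source B: [(a[1], b[1]) for a, b in zip(runs, runs[1:]) if a[0]]
def condense_anomalous_periods_alt (labelled_values : List (Int × Int × Bool)) : List (Int × Int) :=
  let runs := pvB_runs labelled_values none
  (runs.zip runs.tail).filterMap (fun ab => if ab.1.1 then some (ab.1.2, ab.2.2) else none)

-- ===== PRECONDITION & SPEC =====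
def Spec_condense_anomalous_periods (labelled_values : List (Int × Int × Bool)) (out : List (Int × Int)) : Prop := out = condense_anomalous_periods_alt labelled_values
instance (labelled_values : List (Int × Int × Bool)) (out : List (Int × Int)) : Decidable (Spec_condense_anomalous_periods labelled_values out) := by unfold Spec_condense_anomalous_periods; infer_instance

-- ===== CLAIM (what is proved, stated in full; the proofs are below) =====
def Claim_equal_condense_anomalous_periods : Prop := ∀ (labelled_values : List (Int × Int × Bool)), Dom_condense_anomalous_periods labelled_values → Spec_condense_anomalous_periods labelled_values (condense_anomalous_periods labelled_values)

-- ===== LEMMAS AND PROOFS =====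

-- the pairing of adjacent runs, in directly recursive form (proof-side reformulation of phase 2)
def pvP : List (Bool × Int) → List (Int × Int)
  | [] => []
  | [_] => []
  | a :: b :: rest => (if a.1 then [(a.2, b.2)] else []) ++ pvP (b :: rest)

lemma pvP_eq_zip (rs : List (Bool × Int)) :
    (rs.zip rs.tail).filterMap (fun ab => if ab.1.1 then some (ab.1.2, ab.2.2) else none) = pvP rs := by
  match rs with
  | [] => rfl
  | [a] => rfl
  | a :: b :: rest =>
    simp only [List.tail, List.zip_cons_cons, List.filterMap_cons, pvP]
    rw [← pvP_eq_zip (b :: rest)]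
    by_cases h : a.1 = true <;> simp [h, List.tail]

lemma pvP_cons_false (m : Int) (rs : List (Bool × Int)) :
    pvP ((false, m) :: rs) = pvP rs := by
  cases rs <;> simp [pvP]

-- The core invariant: A's loop, in either loop state, equals acc ++ the pairing of the runs
-- B still has to produce, with a pending open run (true, s) when currently_anom holds.
lemma pvMain (xs : List (Int × Int × Bool)) :
    (∀ (acc : List (Int × Int)) (st : Option Int) (prev : Option Bool), prev ≠ some true →
        pvA_loop xs acc false st = acc ++ pvP (pvB_runs xs prev)) ∧
    (∀ (acc : List (Int × Int)) (s : Int),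
        pvA_loop xs acc true (some s) = acc ++ pvP ((true, s) :: pvB_runs xs (some true))) := by
  induction xs with
  | nil =>
    constructor
    · intro acc st prev _; simp [pvA_loop, pvB_runs, pvP]
    · intro acc s; simp [pvA_loop, pvB_runs, pvP]
  | cons hd rest ih =>
    obtain ⟨m, v, a⟩ := hd
    constructor
    · intro acc st prev hprev
      cases a with
      | true =>
        have h1 : pvA_loop ((m, v, true) :: rest) acc false st = pvA_loop rest acc true (some m) := by
          simp [pvA_loop]
        have h2 : pvB_runs ((m, v, true) :: rest) prev = (true, m) :: pvB_runs rest (some true) := by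
          simp [pvB_runs, Ne.symm hprev]
        rw [h1, h2, ih.2]
      | false =>
        have h1 : pvA_loop ((m, v, false) :: rest) acc false st = pvA_loop rest acc false st := by
          simp [pvA_loop]
        rw [h1]
        by_cases hp : prev = some false
        · have h2 : pvB_runs ((m, v, false) :: rest) prev = pvB_runs rest prev := by
            simp [pvB_runs, hp]
          rw [h2, hp] at *
          exact ih.1 acc st (some false) (by simp)
        · have h2 : pvB_runs ((m, v, false) :: rest) prev
              = (false, m) :: pvB_runs rest (some false) := by
            have : some false ≠ prev := fun h => hp h.symm
            simp [pvB_runs, this]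
          rw [h2, pvP_cons_false]
          exact ih.1 acc st (some false) (by simp)
    · intro acc s
      cases a with
      | true =>
        have h1 : pvA_loop ((m, v, true) :: rest) acc true (some s)
            = pvA_loop rest acc true (some s) := by simp [pvA_loop]
        have h2 : pvB_runs ((m, v, true) :: rest) (some true) = pvB_runs rest (some true) := by
          simp [pvB_runs]
        rw [h1, h2, ih.2]
      | false =>
        have h1 : pvA_loop ((m, v, false) :: rest) acc true (some s)
            = pvA_loop rest (acc ++ [(s, m)]) false (some s) := by simp [pvA_loop]
        have h2 : pvB_runs ((m, v, false) :: rest) (some true)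
            = (false, m) :: pvB_runs rest (some false) := by simp [pvB_runs]
        rw [h1, h2, ih.1 (acc ++ [(s, m)]) (some s) (some false) (by simp)]
        have h3 : pvP ((true, s) :: (false, m) :: pvB_runs rest (some false))
            = (s, m) :: pvP ((false, m) :: pvB_runs rest (some false)) := by simp [pvP]
        rw [h3, pvP_cons_false]
        simp

-- ===== VERDICT (by name: the statement is the Claim_ definition above) =====
theorem condense_anomalous_periods_spec : Claim_equal_condense_anomalous_periods := by
  intro xs _
  unfold Spec_condense_anomalous_periods condense_anomalous_periods condense_anomalous_periods_alt
  rw [pvP_eq_zip]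
  simpa using (pvMain xs).1 [] none none (by simp)
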